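-- pv_equiv track=rewrite | github.com/yuanzhedong/evolvebench | agents/cocoa_agent/run_task.py | _format_execution_summary
-- ===== SOURCE A (Python) =====
-- def _format_execution_summary(result: dict, max_chars_per_feedback: int = 2000, max_total_chars: int = 80000) -> str:
--     """Format execution_trace for LLM judge (evolve_bench parity)."""
--     trace = result.get("execution_trace", [])
--     if not trace:
--         return ""
--     lines = []
--     total_chars = 0
--     for i, entry in enumerate(trace, 1):
--         action = entry.get("action", {})
--         feedback = entry.get("feedback", {})
--         atype = action.get("action_type", "unknown")
--         param_parts = [f"  {k}: {str(v)[:500]}{'...' if len(str(v)) > 500 else ''}"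
--                       for k, v in action.items() if k not in ("action_type", "tool_call_id")]
--         params_block = "\n".join(param_parts) if param_parts else "  (no parameters)"
--         msg = feedback.get("message", "")
--         if len(msg) > max_chars_per_feedback:
--             msg = msg[:max_chars_per_feedback] + f"... [truncated, {len(msg)} total chars]"
--         step_text = f"Step {i}: {atype}\n{params_block}\n-> {msg}\n"
--         total_chars += len(step_text)
--         if total_chars > max_total_chars:
--             lines.append(f"... [trace truncated at step {i}/{len(trace)}]")
--             break
--         lines.append(step_text)
--     return "\n".join(lines)
-- ===== SOURCE B (Python) =====
-- def _step_text(i, entry, max_chars_per_feedback):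
--     action = entry.get("action", {})
--     feedback = entry.get("feedback", {})
--     atype = action.get("action_type", "unknown")
--     param_parts = [f"  {k}: {str(v)[:500]}{'...' if len(str(v)) > 500 else ''}"
--                    for k, v in action.items() if k not in ("action_type", "tool_call_id")]
--     params_block = "\n".join(param_parts) if param_parts else "  (no parameters)"
--     msg = feedback.get("message", "")
--     if len(msg) > max_chars_per_feedback:
--         msg = msg[:max_chars_per_feedback] + f"... [truncated, {len(msg)} total chars]"
--     return f"Step {i}: {atype}\n{params_block}\n-> {msg}\n"
--
--
-- def _format_execution_summary(result: dict, max_chars_per_feedback: int = 2000, max_total_chars: int = 80000) -> str: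
--     trace = result.get("execution_trace", [])
--     if not trace:
--         return ""
--     steps = [_step_text(i, e, max_chars_per_feedback) for i, e in enumerate(trace, 1)]
--     cut = None
--     total = 0
--     for idx, s in enumerate(steps):
--         total += len(s)
--         if total > max_total_chars:
--             cut = idx
--             break
--     if cut is None:
--         return "\n".join(steps)
--     return "\n".join(steps[:cut] + [f"... [trace truncated at step {cut + 1}/{len(trace)}]"])
-- ===== Notes on version B (the rewrite author's own statement) =====
-- stated objective: alternative
-- what changed: B separates formatting from truncation: it first formats every trace entry into its step text, then finds the cutoff index by a running character-count scan and joins the prefix (plus the marker line if a cutoff was hit), instead of A's single fused loop that formats, counts and breaks in one pass.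
import Mathlib
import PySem

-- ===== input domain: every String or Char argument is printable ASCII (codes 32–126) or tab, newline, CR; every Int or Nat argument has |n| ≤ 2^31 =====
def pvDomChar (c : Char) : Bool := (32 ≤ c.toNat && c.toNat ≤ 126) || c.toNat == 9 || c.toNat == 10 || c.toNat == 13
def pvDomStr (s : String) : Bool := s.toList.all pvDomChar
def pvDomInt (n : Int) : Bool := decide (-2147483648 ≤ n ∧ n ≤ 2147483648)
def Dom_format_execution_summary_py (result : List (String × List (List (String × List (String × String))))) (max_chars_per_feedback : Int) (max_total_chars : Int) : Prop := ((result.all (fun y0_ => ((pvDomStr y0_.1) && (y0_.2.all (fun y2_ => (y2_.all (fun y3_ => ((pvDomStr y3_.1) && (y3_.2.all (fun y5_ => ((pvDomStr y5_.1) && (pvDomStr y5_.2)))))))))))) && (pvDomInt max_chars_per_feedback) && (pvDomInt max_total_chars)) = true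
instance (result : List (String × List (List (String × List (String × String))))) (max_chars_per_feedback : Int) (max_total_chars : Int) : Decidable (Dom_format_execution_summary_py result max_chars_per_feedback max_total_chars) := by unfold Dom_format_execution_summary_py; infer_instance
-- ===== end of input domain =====

-- B formats all step texts first and truncates in a second running-sum scan, instead of A's
-- single fused format-count-break loop; same cost, different decomposition (objective: alternative).

-- Shared per-entry formatting (textually identical in both Pythons: param truncation at 500,
-- message truncation at max_chars_per_feedback, the "Step i:" header).
def pvStepText (i : Int) (entry : List (String × List (String × String))) (max_chars_per_feedback : Int) : String :=
  let action := PySem.Dict.getD (PySem.Dict.mk entry) "action" []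
  let feedback := PySem.Dict.getD (PySem.Dict.mk entry) "feedback" []
  let atype := PySem.Dict.getD (PySem.Dict.mk action) "action_type" "unknown"
  let param_parts := (action.filter (fun kv => !(kv.1 == "action_type") && !(kv.1 == "tool_call_id"))).map
      (fun kv => "  " ++ kv.1 ++ ": " ++ PySem.Str.slice kv.2 none (some 500) ++
        (if PySem.Str.len kv.2 > 500 then "..." else ""))
  let params_block := if param_parts.isEmpty then "  (no parameters)" else PySem.Str.join "\n" param_parts
  let msg := PySem.Dict.getD (PySem.Dict.mk feedback) "message" ""
  let msg := if PySem.Str.len msg > max_chars_per_feedback then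
      PySem.Str.slice msg none (some max_chars_per_feedback) ++ "... [truncated, " ++
        PySem.Int.toStr (PySem.Str.len msg) ++ " total chars]"
    else msg
  "Step " ++ PySem.Int.toStr i ++ ": " ++ atype ++ "\n" ++ params_block ++ "\n-> " ++ msg ++ "\n"

-- The "... [trace truncated at step i/n]" marker line (same f-string in both Pythons).
def pvMarker (i n : Int) : String :=
  "... [trace truncated at step " ++ PySem.Int.toStr i ++ "/" ++ PySem.Int.toStr n ++ "]"

-- ===== PORT A =====
-- A's fused loop: format, add to total, break with the marker on overflow.
def pvALoop (mcpf mtc n : Int) : List (List (String × List (String × String))) → Int → Int → List String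
  | [], _, _ => []
  | e :: rest, i, total =>
    let st := pvStepText i e mcpf
    let total' := total + PySem.Str.len st
    if total' > mtc then [pvMarker i n]
    else st :: pvALoop mcpf mtc n rest (i + 1) total'

def format_execution_summary_py (result : List (String × List (List (String × List (String × String))))) (max_chars_per_feedback : Int) (max_total_chars : Int) : String :=
  let trace := PySem.Dict.getD (PySem.Dict.mk result) "execution_trace" []
  if trace.isEmpty then ""
  else PySem.Str.join "\n" (pvALoop max_chars_per_feedback max_total_chars (PySem.List.len trace) trace 1 0)

-- ===== PORT B =====
-- B's step-text list: [_step_text(i, e, mcpf) for i, e in enumerate(trace, 1)]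
def pvBSteps (mcpf : Int) : Int → List (List (String × List (String × String))) → List String
  | _, [] => []
  | i, e :: rest => pvStepText i e mcpf :: pvBSteps mcpf (i + 1) rest

-- B's cutoff scan: first index where the running total exceeds mtc (None if never).
def pvBFindCut (mtc : Int) : List String → Int → Nat → Option Nat
  | [], _, _ => none
  | s :: rest, total, idx =>
    let t := total + PySem.Str.len s
    if t > mtc then some idx else pvBFindCut mtc rest t (idx + 1)

def format_execution_summary_py_alt (result : List (String × List (List (String × List (String × String))))) (max_chars_per_feedback : Int) (max_total_chars : Int) : String :=
  let trace := PySem.Dict.getD (PySem.Dict.mk result) "execution_trace" []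
  if trace.isEmpty then ""
  else
    let steps := pvBSteps max_chars_per_feedback 1 trace
    match pvBFindCut max_total_chars steps 0 0 with
    | none => PySem.Str.join "\n" steps
    | some cut => PySem.Str.join "\n" (steps.take cut ++ [pvMarker ((cut : Int) + 1) (PySem.List.len trace)])

-- ===== PRECONDITION & SPEC =====
def Spec_format_execution_summary_py (result : List (String × List (List (String × List (String × String))))) (max_chars_per_feedback : Int) (max_total_chars : Int) (out : String) : Prop := out = format_execution_summary_py_alt result max_chars_per_feedback max_total_chars
instance (result : List (String × List (List (String × List (String × String))))) (max_chars_per_feedback : Int) (max_total_chars : Int) (out : String) : Decidable (Spec_format_execution_summary_py result max_chars_per_feedback max_total_chars out) := by unfold Spec_format_execution_summary_py; infer_instance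

-- ===== CLAIM (what is proved, stated in full; the proofs are below) =====
def Claim_equal_format_execution_summary_py : Prop := ∀ (result : List (String × List (List (String × List (String × String))))) (max_chars_per_feedback : Int) (max_total_chars : Int), Dom_format_execution_summary_py result max_chars_per_feedback max_total_chars → Spec_format_execution_summary_py result max_chars_per_feedback max_total_chars (format_execution_summary_py result max_chars_per_feedback max_total_chars)

-- ===== LEMMAS AND PROOFS =====

-- pvBFindCut started at index z is the 0-started scan shifted by z.
theorem pvBFindCut_shift (mtc : Int) (l : List String) (total : Int) (z : Nat) :
    pvBFindCut mtc l total z = (pvBFindCut mtc l total 0).map (· + z) := by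
  induction l generalizing total z with
  | nil => simp [pvBFindCut]
  | cons s rest ih =>
    simp only [pvBFindCut]
    split_ifs with h
    · simp
    · rw [ih _ (z + 1), ih _ 1]
      cases pvBFindCut mtc rest (total + PySem.Str.len s) 0
      · simp
      · simp; omega

-- A's fused loop equals B's "format all, then cut" pipeline, for any start index and total.
theorem pvALoop_eq (mcpf mtc n : Int) (l : List (List (String × List (String × String)))) :
    ∀ (i total : Int),
      pvALoop mcpf mtc n l i total =
        match pvBFindCut mtc (pvBSteps mcpf i l) total 0 with
        | none => pvBSteps mcpf i l
        | some c => (pvBSteps mcpf i l).take c ++ [pvMarker (i + (c : Int)) n] := by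
  induction l with
  | nil => intro i total; simp [pvALoop, pvBSteps, pvBFindCut]
  | cons e rest ih =>
    intro i total
    simp only [pvALoop, pvBSteps, pvBFindCut]
    split_ifs with h
    · simp
    · rw [pvBFindCut_shift mtc _ _ 1, ih (i + 1) (total + PySem.Str.len (pvStepText i e mcpf))]
      cases pvBFindCut mtc (pvBSteps mcpf (i + 1) rest) (total + PySem.Str.len (pvStepText i e mcpf)) 0 with
      | none => simp
      | some c =>
        simp only [Option.map_some, List.take_succ_cons, List.cons_append]
        push_cast
        rw [show i + ((c : Int) + 1) = i + 1 + (c : Int) from by ring]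

-- ===== VERDICT (by name: the statement is the Claim_ definition above) =====
theorem format_execution_summary_py_spec : Claim_equal_format_execution_summary_py := by
  intro result mcpf mtc _
  unfold Spec_format_execution_summary_py format_execution_summary_py format_execution_summary_py_alt
  by_cases h : (PySem.Dict.getD (PySem.Dict.mk result) "execution_trace" []).isEmpty
  · simp [h]
  · simp only [h]
    rw [pvALoop_eq]
    cases hc : pvBFindCut mtc (pvBSteps mcpf 1 (PySem.Dict.getD (PySem.Dict.mk result) "execution_trace" [])) 0 0 with
    | none => rfl
    | some c =>
      simp only
      rw [show (1 : Int) + (c : Int) = (c : Int) + 1 from by ring]
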